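-- pv_equiv track=rewrite | github.com/prinpice/Algorithm-Practice | Programmers/이상한 문자 만들기.py | solution
-- ===== SOURCE A (Python) =====
-- def solution(s):
--     answer = ""
--     string_list = s.split(" ")
--     for idx, val in enumerate(string_list):
--         val_list = list(val)
--         for idx_alpha, alpha in enumerate(val_list):
--             if idx_alpha % 2 == 0:
--                 val_list[idx_alpha] = alpha.upper()
--         string_list[idx] = "".join(val_list)
--     answer = " ".join(string_list)
--     return answer
-- ===== SOURCE B (Python) =====
-- def solution(s):
--     out = []
--     cnt = 0
--     for ch in s:
--         if ch == " ":
--             out.append(" ")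
--             cnt = 0
--         else:
--             out.append(ch.upper() if cnt % 2 == 0 else ch)
--             cnt += 1
--     return "".join(out)
-- ===== Notes on version B (the rewrite author's own statement) =====
-- stated objective: simpler
-- what changed: Replaces split-into-words + nested indexed loop + join by a single pass over the string with a position counter that resets at each space.
import Mathlib
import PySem

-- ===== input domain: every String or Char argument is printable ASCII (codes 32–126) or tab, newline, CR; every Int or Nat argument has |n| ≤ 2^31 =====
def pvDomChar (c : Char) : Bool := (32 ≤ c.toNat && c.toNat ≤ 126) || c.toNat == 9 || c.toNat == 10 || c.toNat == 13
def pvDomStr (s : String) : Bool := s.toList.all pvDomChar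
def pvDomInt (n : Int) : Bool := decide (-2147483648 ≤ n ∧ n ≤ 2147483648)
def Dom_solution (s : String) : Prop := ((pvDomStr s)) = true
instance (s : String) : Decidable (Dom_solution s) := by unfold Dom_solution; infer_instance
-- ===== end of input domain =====

-- B replaces A's split/nested-indexed-loop/join by one pass with a position counter reset at spaces (objective: simpler); return values proved equal on all of Dom.

-- ===== PORT A =====
-- per-word body of A's inner loop: enumerate the word's chars, uppercase those at even index
def solWordA (w : List Char) : List Char :=
  (PySem.List.enumerate w 0).map
    (fun p => if PySem.Int.mod p.1 2 = 0 then PySem.Chars.upperChar p.2 else p.2)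

def solution (s : String) : String :=
  String.mk (PySem.Chars.join [' ']
    ((PySem.Chars.splitOn s.toList [' ']).map solWordA))

-- ===== PORT B =====
-- one step of B's loop: append the (possibly uppercased) char, update the counter
def solStepB (st : List Char × Int) (ch : Char) : List Char × Int :=
  if ch = ' ' then (st.1 ++ [' '], 0)
  else (st.1 ++ [if PySem.Int.mod st.2 2 = 0 then PySem.Chars.upperChar ch else ch], st.2 + 1)

def solution_alt (s : String) : String :=
  String.mk (s.toList.foldl solStepB ([], 0)).1

-- ===== PRECONDITION & SPEC =====
def Spec_solution (s : String) (out : String) : Prop := out = solution_alt s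
instance (s : String) (out : String) : Decidable (Spec_solution s out) := by unfold Spec_solution; infer_instance

-- ===== CLAIM (what is proved, stated in full; the proofs are below) =====
def Claim_equal_solution : Prop := ∀ (s : String), Dom_solution s → Spec_solution s (solution s)

-- ===== LEMMAS AND PROOFS =====

-- the characters produced by B's pass over cs with counter k (proof-only recursive spec)
def outSp : List Char → Int → List Char
  | [], _ => []
  | c :: t, k =>
    if c = ' ' then ' ' :: outSp t 0
    else (if PySem.Int.mod k 2 = 0 then PySem.Chars.upperChar c else c) :: outSp t (k + 1)

-- A's per-word map with the enumeration starting at k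
def wordAux (w : List Char) (k : Int) : List Char :=
  (PySem.List.enumerate w k).map
    (fun p => if PySem.Int.mod p.1 2 = 0 then PySem.Chars.upperChar p.2 else p.2)

theorem foldB_eq (cs : List Char) : ∀ (acc : List Char) (k : Int),
    (cs.foldl solStepB (acc, k)).1 = acc ++ outSp cs k := by
  induction cs with
  | nil => intro acc k; simp [outSp]
  | cons c t ih =>
    intro acc k
    by_cases h : c = ' ' <;> simp [solStepB, outSp, h, ih]

theorem go_step (fuel : Nat) (c : Char) (rest cur : List Char) (acc : List (List Char)) :
    PySem.Chars.splitOn.go [' '] (fuel+1) (c::rest) cur acc =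
      if c = ' ' then PySem.Chars.splitOn.go [' '] fuel rest [] (cur.reverse :: acc)
      else PySem.Chars.splitOn.go [' '] fuel rest (c::cur) acc := by
  have hpre : [' '].isPrefixOf (c::rest) = (' ' == c) := by
    simp only [List.isPrefixOf, Bool.and_true]
  have hdef : PySem.Chars.splitOn.go [' '] (fuel+1) (c::rest) cur acc =
      if [' '].isPrefixOf (c::rest) = true then PySem.Chars.splitOn.go [' '] fuel rest [] (cur.reverse :: acc)
      else PySem.Chars.splitOn.go [' '] fuel rest (c::cur) acc := rfl
  rw [hdef, hpre]
  by_cases h : c = ' '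
  · subst h; simp
  · rw [if_neg (by simpa using fun hh => h hh.symm), if_neg h]

theorem splitOn_cons (c : Char) (t : List Char) :
    (c :: t).splitOn ' ' = if c = ' ' then [] :: t.splitOn ' ' else (t.splitOn ' ').modifyHead (c :: ·) := by
  simp only [List.splitOn, List.splitOnP_cons, beq_iff_eq]

theorem splitOn_ne_nil' (cs : List Char) : cs.splitOn ' ' ≠ [] := by
  simp only [List.splitOn]; exact List.splitOnP_ne_nil _ _

theorem pysem_splitOn_eq : ∀ (fuel : Nat) (l cur : List Char) (acc : List (List Char)),
    l.length < fuel →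
    PySem.Chars.splitOn.go [' '] fuel l cur acc
      = acc.reverse ++ (l.splitOn ' ').modifyHead (cur.reverse ++ ·) := by
  intro fuel
  induction fuel with
  | zero => intro l cur acc h; omega
  | succ f ih =>
    intro l cur acc h
    cases l with
    | nil =>
      rw [PySem.Chars.splitOn.go.eq_def]
      simp [List.splitOn]
    | cons c rest =>
      rw [go_step]
      by_cases hc : c = ' '
      · subst hc
        rw [if_pos rfl, ih rest [] _ (by simpa using h), splitOn_cons, if_pos rfl]
        obtain ⟨w, ws, hw⟩ := List.exists_cons_of_ne_nil (splitOn_ne_nil' rest)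
        simp [hw]
      · rw [if_neg hc, ih rest (c::cur) _ (by simpa using h), splitOn_cons, if_neg hc]
        obtain ⟨w, ws, hw⟩ := List.exists_cons_of_ne_nil (splitOn_ne_nil' rest)
        simp [hw]

theorem splitOn_eq (cs : List Char) :
    PySem.Chars.splitOn cs [' '] = cs.splitOn ' ' := by
  rw [PySem.Chars.splitOn, pysem_splitOn_eq _ _ _ _ (by omega)]
  obtain ⟨w, ws, hw⟩ := List.exists_cons_of_ne_nil (splitOn_ne_nil' cs)
  simp [hw]

theorem intercalate_space (ws : List (List Char)) (w : List Char) :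
    [' '].intercalate (w :: ws) = w ++ ws.flatMap (fun v => ' ' :: v) := by
  induction ws generalizing w with
  | nil => simp [List.intercalate]
  | cons v vs ih =>
    have : [' '].intercalate (w :: v :: vs) = w ++ [' '] ++ [' '].intercalate (v :: vs) := by
      simp [List.intercalate, List.intersperse]
    rw [this, ih v]
    simp

theorem outSp_eq (cs : List Char) : ∀ (k : Int) (w : List Char) (ws : List (List Char)),
    cs.splitOn ' ' = w :: ws →
    outSp cs k = wordAux w k ++ ws.flatMap (fun v => ' ' :: wordAux v 0) := by
  induction cs with
  | nil =>
    intro k w ws hsp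
    have hnil : ([] : List Char).splitOn ' ' = [[]] := by simp [List.splitOn]
    rw [hnil] at hsp
    injection hsp with h1 h2
    subst h1; subst h2
    simp [outSp, wordAux, PySem.List.enumerate]
  | cons c t ih =>
    intro k w ws hsp
    rw [splitOn_cons] at hsp
    by_cases hc : c = ' '
    · rw [if_pos hc] at hsp
      injection hsp with h1 h2
      subst h1
      obtain ⟨w', ws', hw'⟩ := List.exists_cons_of_ne_nil (splitOn_ne_nil' t)
      subst hc
      rw [← h2, hw']
      simp only [outSp, wordAux, PySem.List.enumerate_nil, List.map_nil,
        List.nil_append, List.flatMap_cons]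
      rw [ih 0 w' ws' hw']
      simp [wordAux]
    · rw [if_neg hc] at hsp
      obtain ⟨w', ws', hw'⟩ := List.exists_cons_of_ne_nil (splitOn_ne_nil' t)
      rw [hw'] at hsp
      simp only [List.modifyHead] at hsp
      injection hsp with h1 h2
      subst h1; subst h2
      simp only [outSp, if_neg hc, wordAux, PySem.List.enumerate_cons, List.map_cons]
      rw [ih (k+1) w' ws' hw']
      simp [wordAux]

-- ===== VERDICT (by name: the statement is the Claim_ definition above) =====
theorem solution_spec : Claim_equal_solution := by
  intro s _
  unfold Spec_solution solution solution_alt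
  rw [foldB_eq]
  cases hsp : s.toList.splitOn ' ' with
  | nil => exact absurd hsp (splitOn_ne_nil' _)
  | cons w ws =>
    rw [outSp_eq s.toList 0 w ws hsp]
    simp only [PySem.Chars.join, splitOn_eq, hsp, List.map_cons]
    rw [intercalate_space]
    simp [wordAux, solWordA, List.flatMap_map]
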